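-- pv_equiv track=rewrite | github.com/OliverFeronel090597/GES_Grading_App | tests/Instraction.py | _convert_paragraphs
-- ===== SOURCE A (Python) =====
-- def _convert_paragraphs(text):
--     """Wrap text in paragraphs"""
--     lines = text.split('\n')
--     result = []
--     in_paragraph = False
--     paragraph_lines = []
--
--     for line in lines:
--         line = line.strip()
--         if line and not line.startswith('<'):
--             if not in_paragraph:
--                 in_paragraph = True
--             paragraph_lines.append(line)
--         else:
--             if in_paragraph:
--                 result.append(f'<p>{" ".join(paragraph_lines)}</p>')
--                 paragraph_lines = []
--                 in_paragraph = False
--             if line: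
--                 result.append(line)
--
--     if in_paragraph:
--         result.append(f'<p>{" ".join(paragraph_lines)}</p>')
--
--     return '\n'.join(result)
-- ===== SOURCE B (Python) =====
-- def _convert_paragraphs(text):
--     """Wrap text in paragraphs"""
--     stripped = [l.strip() for l in text.split('\n')]
--
--     def is_content(l):
--         return bool(l) and not l.startswith('<')
--
--     result = []
--     i, n = 0, len(stripped)
--     while i < n:
--         # find the end of the run of lines sharing is_content with stripped[i]
--         j = i + 1
--         while j < n and is_content(stripped[j]) == is_content(stripped[i]):
--             j += 1
--         group = stripped[i:j]
--         if is_content(stripped[i]):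
--             result.append('<p>' + ' '.join(group) + '</p>')
--         else:
--             result.extend(l for l in group if l)
--         i = j
--     return '\n'.join(result)
-- ===== Notes on version B (the rewrite author's own statement) =====
-- stated objective: alternative
-- what changed: Replaces A's stateful line loop (in_paragraph flag plus accumulated paragraph_lines, flushed on non-content lines and at the end) by a groupby-style run scan: strip all lines first, then partition them into maximal runs of equal is_content key and render each run at once (content run -> one <p>...</p>, non-content run -> its non-empty lines).
import Mathlib
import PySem

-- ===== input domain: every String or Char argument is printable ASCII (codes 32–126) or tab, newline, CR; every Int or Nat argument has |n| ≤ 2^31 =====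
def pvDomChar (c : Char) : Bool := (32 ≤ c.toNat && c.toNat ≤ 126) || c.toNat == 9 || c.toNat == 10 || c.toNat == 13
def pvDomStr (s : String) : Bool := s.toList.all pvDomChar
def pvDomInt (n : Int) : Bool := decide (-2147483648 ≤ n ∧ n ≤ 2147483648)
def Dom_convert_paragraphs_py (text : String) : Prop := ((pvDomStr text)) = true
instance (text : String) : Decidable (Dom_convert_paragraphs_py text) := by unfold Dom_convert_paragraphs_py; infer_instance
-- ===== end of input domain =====

-- B rewrites A's stateful flag-and-flush line loop as a groupby-style run scan (alternative decomposition, same cost).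

-- ===== PORT A =====
-- loop body on an already-stripped line (A strips at the top of each iteration: see pvStepA)
def pvStepS (st : List String × Bool × List String) (line : String) :
    List String × Bool × List String :=
  if !(line == "") && !(PySem.Str.startswith line "<") then
    (st.1, true, st.2.2 ++ [line])
  else
    let st1 := if st.2.1 then
        (st.1 ++ ["<p>" ++ PySem.Str.join " " st.2.2 ++ "</p>"], false, ([] : List String))
      else st
    if !(line == "") then (st1.1 ++ [line], st1.2.1, st1.2.2) else st1

def pvStepA (st : List String × Bool × List String) (line : String) :
    List String × Bool × List String :=
  pvStepS st (PySem.Str.strip line)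

def convert_paragraphs_py (text : String) : String :=
  let lines := (PySem.Str.split? text "\n").getD []
  let st := lines.foldl pvStepA ([], false, [])
  let result := st.1 ++
    (if st.2.1 then ["<p>" ++ PySem.Str.join " " st.2.2 ++ "</p>"] else [])
  PySem.Str.join "\n" result

-- ===== PORT B =====
def pvContent (l : String) : Bool := !(l == "") && !(PySem.Str.startswith l "<")

-- maximal runs of lines sharing the is_content key (the while-loop run scan in Source B)
def pvGroups : List String → List (List String)
  | [] => []
  | x :: xs =>
      (x :: xs.takeWhile (fun y => pvContent y == pvContent x)) ::
        pvGroups (xs.dropWhile (fun y => pvContent y == pvContent x))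
  termination_by xs => xs.length
  decreasing_by
    simpa using Nat.lt_succ_of_le (List.length_dropWhile_le _ _)

def pvRender (g : List String) : List String :=
  if pvContent (g.headD "") then ["<p>" ++ PySem.Str.join " " g ++ "</p>"]
  else g.filter (fun l => !(l == ""))

def convert_paragraphs_py_alt (text : String) : String :=
  let stripped := ((PySem.Str.split? text "\n").getD []).map PySem.Str.strip
  PySem.Str.join "\n" ((pvGroups stripped).flatMap pvRender)

-- ===== PRECONDITION & SPEC =====
def Spec_convert_paragraphs_py (text : String) (out : String) : Prop := out = convert_paragraphs_py_alt text
instance (text : String) (out : String) : Decidable (Spec_convert_paragraphs_py text out) := by unfold Spec_convert_paragraphs_py; infer_instance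

-- ===== CLAIM (what is proved, stated in full; the proofs are below) =====
def Claim_equal_convert_paragraphs_py : Prop := ∀ (text : String), Dom_convert_paragraphs_py text → Spec_convert_paragraphs_py text (convert_paragraphs_py text)

-- ===== LEMMAS AND PROOFS =====
def pvFlat (xs : List String) : List String := (pvGroups xs).flatMap pvRender

def pvFinish (st : List String × Bool × List String) : List String :=
  st.1 ++ (if st.2.1 then ["<p>" ++ PySem.Str.join " " st.2.2 ++ "</p>"] else [])

lemma pvFlat_cons_content (x : String) (xs : List String) (hx : pvContent x = true) :
    pvFlat (x :: xs) =
      ("<p>" ++ PySem.Str.join " " (x :: xs.takeWhile pvContent) ++ "</p>") ::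
        pvFlat (xs.dropWhile pvContent) := by
  simp [pvFlat, pvGroups, pvRender, hx]

lemma pvFlat_cons_noncontent (x : String) (xs : List String) (hx : pvContent x = false) :
    pvFlat (x :: xs) =
      (if x == "" then [] else [x]) ++
        ((xs.takeWhile (fun y => !pvContent y)).filter (fun l => !(l == "")) ++
          pvFlat (xs.dropWhile (fun y => !pvContent y))) := by
  simp [pvFlat, pvGroups, pvRender, hx, List.filter]
  by_cases h : x = ""
  · simp [h]
  · simp [h, show (x == "") = false by simpa using h]

-- absorption: a leading non-content run is rendered element by element
lemma pvFlat_noncontent_run (xs : List String) :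
    pvFlat xs =
      (xs.takeWhile (fun y => !pvContent y)).filter (fun l => !(l == "")) ++
        pvFlat (xs.dropWhile (fun y => !pvContent y)) := by
  cases xs with
  | nil => simp [pvFlat, pvGroups]
  | cons x xs =>
    by_cases hx : pvContent x = true
    · simp [hx]
    · rw [pvFlat_cons_noncontent x xs (by simpa using hx)]
      simp [hx, List.filter]
      by_cases h : x = ""
      · simp [h]
      · simp [h, show (x == "") = false by simpa using h]

lemma pvKey : ∀ (n : Nat) (xs : List String), xs.length ≤ n →
    (∀ acc : List String, pvFinish (xs.foldl pvStepS (acc, false, [])) = acc ++ pvFlat xs) ∧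
    (∀ (acc ps : List String),
      pvFinish (xs.foldl pvStepS (acc, true, ps)) =
        acc ++ ("<p>" ++ PySem.Str.join " " (ps ++ xs.takeWhile pvContent) ++ "</p>") ::
          pvFlat (xs.dropWhile pvContent)) := by
  intro n
  induction n with
  | zero =>
    intro xs hxs
    have hx : xs = [] := List.eq_nil_of_length_eq_zero (Nat.le_zero.mp hxs)
    subst hx
    exact ⟨fun acc => by simp [pvFinish, pvFlat, pvGroups],
           fun acc ps => by simp [pvFinish, pvFlat, pvGroups]⟩
  | succ n ih =>
    intro xs hxs
    cases xs with
    | nil =>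
      exact ⟨fun acc => by simp [pvFinish, pvFlat, pvGroups],
             fun acc ps => by simp [pvFinish, pvFlat, pvGroups]⟩
    | cons x xs =>
      have hlen : xs.length ≤ n := Nat.le_of_succ_le_succ hxs
      have IH := ih xs hlen
      constructor
      · intro acc
        by_cases hx : pvContent x = true
        · have hc : (!(x == "") && !(PySem.Str.startswith x "<")) = true := hx
          have hstep : pvStepS (acc, false, []) x = (acc, true, [x]) := by
            simp only [pvStepS]; rw [hc]; simp
          rw [List.foldl_cons, hstep, IH.2 acc [x], pvFlat_cons_content x xs hx]
          simp
        · have hx' : pvContent x = false := by simpa using hx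
          have hc : (!(x == "") && !(PySem.Str.startswith x "<")) = false := hx'
          have hstep : pvStepS (acc, false, []) x =
              ((if x == "" then acc else acc ++ [x]), false, []) := by
            simp only [pvStepS]; rw [hc]; by_cases h : (x == "") = true <;> simp [h]
          rw [List.foldl_cons, hstep, IH.1 _, pvFlat_cons_noncontent x xs hx',
              ← pvFlat_noncontent_run xs]
          by_cases h : x = ""
          · simp [h]
          · simp [show (x == "") = false by simpa using h]
      · intro acc ps
        by_cases hx : pvContent x = true
        · have hc : (!(x == "") && !(PySem.Str.startswith x "<")) = true := hx
          have hstep : pvStepS (acc, true, ps) x = (acc, true, ps ++ [x]) := by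
            simp only [pvStepS]; rw [hc]; simp
          rw [List.foldl_cons, hstep, IH.2 acc (ps ++ [x])]
          simp [hx]
        · have hx' : pvContent x = false := by simpa using hx
          have hc : (!(x == "") && !(PySem.Str.startswith x "<")) = false := hx'
          have hstep : pvStepS (acc, true, ps) x =
              ((if x == "" then acc ++ ["<p>" ++ PySem.Str.join " " ps ++ "</p>"]
                else acc ++ ["<p>" ++ PySem.Str.join " " ps ++ "</p>"] ++ [x]), false, []) := by
            simp only [pvStepS]; rw [hc]; by_cases h : (x == "") = true <;> simp [h]
          rw [List.foldl_cons, hstep, IH.1 _]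
          simp only [List.takeWhile_cons, List.dropWhile_cons, hx', Bool.false_eq_true,
            if_false]
          rw [pvFlat_cons_noncontent x xs hx', ← pvFlat_noncontent_run xs]
          by_cases h : x = ""
          · simp [h]
          · simp [show (x == "") = false by simpa using h, List.append_assoc]

-- ===== VERDICT (by name: the statement is the Claim_ definition above) =====
theorem convert_paragraphs_py_spec : Claim_equal_convert_paragraphs_py := by
  intro text _
  unfold Spec_convert_paragraphs_py convert_paragraphs_py convert_paragraphs_py_alt
  have hfold :
      ((PySem.Str.split? text "\n").getD []).foldl pvStepA (([], false, []) : List String × Bool × List String)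
        = (((PySem.Str.split? text "\n").getD []).map PySem.Str.strip).foldl pvStepS ([], false, []) := by
    rw [List.foldl_map]; rfl
  simp only []
  rw [hfold]
  have := (pvKey ((((PySem.Str.split? text "\n").getD []).map PySem.Str.strip)).length _ le_rfl).1 []
  simp only [pvFinish] at this
  rw [this]
  simp [pvFlat]
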